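-- pv_equiv track=rewrite | github.com/effoT/codingbat-py | String-3.py | countYZ
-- ===== SOURCE A (Python) =====
-- def countYZ(text):
--     counter = 0
--     # set the entire string to lowercase to remove the case sensitivity
--     text = text.lower()
--     for o in range(len(text)):
--         # if last character, so that we don't try to run out of index and so that we can test the last character
--         if o == len(text) -1:
--             if text[o] == "y" or text[o] == "z":
--                 counter += 1
--         else:
--             # remember to check that the next character is not an alpha
--             if (text[o] == "y" or text[o] == "z") and text[(o+1)].isalpha() == False:
--                 counter += 1
--     return counter
-- ===== SOURCE B (Python) =====
-- def countYZ(text):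
--     # Tokenize into maximal alphabetic runs, then count words whose last letter is y/z.
--     words = []
--     cur = []
--     for ch in text.lower():
--         if ch.isalpha():
--             cur.append(ch)
--         elif cur:
--             words.append(''.join(cur))
--             cur = []
--     if cur:
--         words.append(''.join(cur))
--     return sum(1 for w in words if w[-1] in 'yz')
-- ===== Notes on version B (the rewrite author's own statement) =====
-- stated objective: simpler
-- what changed: A walks character indices with a lookahead test (special-casing o == len-1 and checking text[o+1].isalpha()); B tokenizes the lowercased text into maximal alphabetic runs in one scan and then counts the words with the right final letter, with no index arithmetic.
import Mathlib
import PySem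

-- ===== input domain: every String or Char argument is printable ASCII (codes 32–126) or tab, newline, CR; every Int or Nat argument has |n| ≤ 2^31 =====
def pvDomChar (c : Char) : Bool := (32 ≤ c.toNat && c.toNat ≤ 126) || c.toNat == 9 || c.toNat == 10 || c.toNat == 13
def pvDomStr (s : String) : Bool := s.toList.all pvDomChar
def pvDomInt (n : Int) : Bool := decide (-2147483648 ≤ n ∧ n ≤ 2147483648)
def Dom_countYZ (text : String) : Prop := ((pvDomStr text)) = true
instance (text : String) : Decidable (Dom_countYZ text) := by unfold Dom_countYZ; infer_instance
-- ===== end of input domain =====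

-- B replaces A's index-based lookahead loop by a tokenize-then-count decomposition (objective: simpler).

-- ===== PORT A =====
-- Indices in A's loop are always in range, so the default of pyGetD is never used.
def countYZ (text : String) : Int :=
  let t : List Char := PySem.Chars.lower text.toList
  (PySem.List.pyRange 0 (t.length : Int) 1).foldl (fun counter o =>
    if o = (t.length : Int) - 1 then
      if PySem.List.pyGetD t o ' ' = 'y' ∨ PySem.List.pyGetD t o ' ' = 'z' then counter + 1
      else counter
    else
      if (PySem.List.pyGetD t o ' ' = 'y' ∨ PySem.List.pyGetD t o ' ' = 'z') ∧
          PySem.Chars.isalpha (PySem.List.pyGetD t (o + 1) ' ') = false then counter + 1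
      else counter) 0

-- ===== PORT B =====
-- Source B's words are Python strings (''.join(cur)); here a word is its list of chars.
-- The loop state is the pair (words, cur); flushing appends cur to words.
def countYZ_alt (text : String) : Int :=
  let t : List Char := PySem.Chars.lower text.toList
  let p := t.foldl (fun (st : List (List Char) × List Char) ch =>
      if PySem.Chars.isalpha ch then (st.1, st.2 ++ [ch])
      else if st.2 ≠ [] then (st.1 ++ [st.2], ([] : List Char))
      else st) ([], [])
  let words := if p.2 ≠ [] then p.1 ++ [p.2] else p.1
  words.foldl (fun s w =>
      if PySem.List.pyGet? w (-1) = some 'y' ∨ PySem.List.pyGet? w (-1) = some 'z' then s + 1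
      else s) 0

-- ===== PRECONDITION & SPEC =====
def Spec_countYZ (text : String) (out : Int) : Prop := out = countYZ_alt text
instance (text : String) (out : Int) : Decidable (Spec_countYZ text out) := by unfold Spec_countYZ; infer_instance

-- ===== CLAIM (what is proved, stated in full; the proofs are below) =====
def Claim_equal_countYZ : Prop := ∀ (text : String), Dom_countYZ text → Spec_countYZ text (countYZ text)

-- ===== LEMMAS AND PROOFS =====

/-- The common specification: count positions holding 'y'/'z' whose successor
    (if any) is not alphabetic. -/
def specCount : List Char → Int
  | [] => 0
  | [c] => if c = 'y' ∨ c = 'z' then 1 else 0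
  | c :: d :: rest =>
      (if (c = 'y' ∨ c = 'z') ∧ PySem.Chars.isalpha d = false then 1 else 0) +
        specCount (d :: rest)

lemma specCount_cons (d : Char) (rs : List Char) :
    specCount (d :: rs) =
      (if (d = 'y' ∨ d = 'z') ∧ rs.head?.all (fun e => !PySem.Chars.isalpha e) = true then 1 else 0)
        + specCount rs := by
  cases rs with
  | nil => simp [specCount]
  | cons e es => simp [specCount]

-- A's loop body, with the scanned list as a parameter.
def stepA (t : List Char) (counter : Int) (o : Int) : Int :=
  if o = (t.length : Int) - 1 then
    if PySem.List.pyGetD t o ' ' = 'y' ∨ PySem.List.pyGetD t o ' ' = 'z' then counter + 1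
    else counter
  else
    if (PySem.List.pyGetD t o ' ' = 'y' ∨ PySem.List.pyGetD t o ' ' = 'z') ∧
        PySem.Chars.isalpha (PySem.List.pyGetD t (o + 1) ' ') = false then counter + 1
    else counter

lemma stepA_shift (c : Char) (rest : List Char) (acc : Int) (k : Nat) :
    stepA (c :: rest) acc ((1 : Int) + k) = stepA rest acc (k : Int) := by
  have h1 : ((1 : Int) + k) = ((k + 1 : Nat) : Int) := by push_cast; ring
  have h2 : (((k + 1 : Nat) : Int) + 1) = ((k + 2 : Nat) : Int) := by push_cast; ring
  have h3 : ((k : Int) + 1) = ((k + 1 : Nat) : Int) := by push_cast; ring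
  unfold stepA
  rw [h1, h2, h3]
  simp only [PySem.List.pyGetD_natCast]
  have hlen : (((c :: rest).length : Int) - 1) = (rest.length : Int) := by simp
  rw [hlen]
  have hcond : (((k + 1 : Nat) : Int) = (rest.length : Int)) ↔ ((k : Int) = (rest.length : Int) - 1) := by
    omega
  have h4 : (k + 2 : Nat) = (k + 1) + 1 := rfl
  rw [h4]
  simp only [List.getD_cons_succ, hcond]

lemma foldA_eq (t : List Char) : ∀ acc : Int,
    (PySem.List.pyRange 0 (t.length : Int) 1).foldl (stepA t) acc = acc + specCount t := by
  induction t with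
  | nil => intro acc; simp [PySem.List.pyRange_one_eq_nil, specCount]
  | cons c rest ih =>
    intro acc
    have hpos : (0 : Int) < ((c :: rest).length : Int) := by exact_mod_cast Nat.succ_pos rest.length
    rw [PySem.List.pyRange_one_cons hpos]
    simp only [List.foldl_cons, zero_add]
    -- reindex the tail range
    have hr1 : PySem.List.pyRange 1 ((c :: rest).length : Int) 1
        = (List.range rest.length).map (fun k : Nat => (1 : Int) + k) := by
      rw [PySem.List.pyRange_one]
      have : (((c :: rest).length : Int) - 1).toNat = rest.length := by simp
      rw [this]
    have hr0 : PySem.List.pyRange 0 (rest.length : Int) 1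
        = (List.range rest.length).map (fun k : Nat => (k : Int)) := by
      rw [PySem.List.pyRange_one]
      simp
    rw [hr1, List.foldl_map]
    have hcongr : (List.range rest.length).foldl (fun acc (k : Nat) => stepA (c :: rest) acc ((1 : Int) + k)) (stepA (c :: rest) acc 0)
        = (List.range rest.length).foldl (fun acc (k : Nat) => stepA rest acc (k : Int)) (stepA (c :: rest) acc 0) := by
      apply PySem.List.foldl_congr_mem
      intro a k _
      exact stepA_shift c rest a k
    have hfold0 : (List.range rest.length).foldl (fun acc (k : Nat) => stepA rest acc (k : Int)) (stepA (c :: rest) acc 0)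
        = (PySem.List.pyRange 0 (rest.length : Int) 1).foldl (stepA rest) (stepA (c :: rest) acc 0) := by
      rw [hr0, List.foldl_map]
    rw [hcongr, hfold0, ih]
    -- head step
    have hhead : stepA (c :: rest) acc 0 = acc +
        (if (c = 'y' ∨ c = 'z') ∧ rest.head?.all (fun e => !PySem.Chars.isalpha e) = true then 1 else 0) := by
      unfold stepA
      cases rest with
      | nil => by_cases hyz : c = 'y' ∨ c = 'z' <;> simp [hyz]
      | cons d ds =>
        have hne : (0 : Int) ≠ ((c :: d :: ds).length : Int) - 1 := by simp; omega
        rw [if_neg hne]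
        have h0 : PySem.List.pyGetD (c :: d :: ds) 0 ' ' = c := PySem.List.pyGetD_zero_cons c (d :: ds) ' '
        have h1 : PySem.List.pyGetD (c :: d :: ds) (0 + 1) ' ' = d := by
          have : ((0 : Int) + 1) = ((1 : Nat) : Int) := by norm_num
          rw [this, PySem.List.pyGetD_natCast]; rfl
        rw [h0, h1]
        simp only [List.head?_cons, Option.all_some]
        by_cases hc : (c = 'y' ∨ c = 'z') ∧ PySem.Chars.isalpha d = false
        · rw [if_pos hc, if_pos (by simpa using hc)]
        · rw [if_neg hc, if_neg (by simpa using hc)]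
          ring
    rw [hhead, specCount_cons]
    ring

-- B-side: the final counting fold over the word list.
def cntYZ (words : List (List Char)) : Int :=
  words.foldl (fun s w =>
      if PySem.List.pyGet? w (-1) = some 'y' ∨ PySem.List.pyGet? w (-1) = some 'z' then s + 1
      else s) 0

-- B's scanning step.
def stepB (st : List (List Char) × List Char) (ch : Char) : List (List Char) × List Char :=
  if PySem.Chars.isalpha ch then (st.1, st.2 ++ [ch])
  else if st.2 ≠ [] then (st.1 ++ [st.2], ([] : List Char))
  else st

def lastTerm (w : List Char) : Int :=
  if PySem.List.pyGet? w (-1) = some 'y' ∨ PySem.List.pyGet? w (-1) = some 'z' then 1 else 0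

/-- Pending contribution of the current partial word, given the rest of the input. -/
def pend (cur : List Char) (t : List Char) : Int :=
  match cur.getLast? with
  | none => 0
  | some c =>
      if t.head?.all (fun e => !PySem.Chars.isalpha e) = true ∧ (c = 'y' ∨ c = 'z') then 1 else 0

lemma cntYZ_eq_foldl (words : List (List Char)) (a : Int) :
    words.foldl (fun s w =>
      if PySem.List.pyGet? w (-1) = some 'y' ∨ PySem.List.pyGet? w (-1) = some 'z' then s + 1
      else s) a = a + cntYZ words := by
  induction words generalizing a with
  | nil => simp [cntYZ]
  | cons w ws ih =>
    simp only [List.foldl_cons]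
    rw [ih]
    have h0 : cntYZ (w :: ws) =
        (if PySem.List.pyGet? w (-1) = some 'y' ∨ PySem.List.pyGet? w (-1) = some 'z' then (0:Int) + 1 else 0)
          + cntYZ ws := by
      unfold cntYZ
      simp only [List.foldl_cons]
      rw [ih]
      rfl
    rw [h0]
    by_cases h : PySem.List.pyGet? w (-1) = some 'y' ∨ PySem.List.pyGet? w (-1) = some 'z'
    · simp [h]; ring
    · simp [h]

lemma cntYZ_append_singleton (words : List (List Char)) (w : List Char) :
    cntYZ (words ++ [w]) = cntYZ words + lastTerm w := by
  unfold cntYZ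
  rw [List.foldl_append, cntYZ_eq_foldl]
  simp [cntYZ, lastTerm]

lemma lastTerm_eq_pend (cur : List Char) (hc : cur ≠ []) (t : List Char)
    (ht : t.head?.all (fun e => !PySem.Chars.isalpha e) = true) :
    lastTerm cur = pend cur t := by
  obtain ⟨c, hcl⟩ := List.getLast?_isSome.mpr hc |> Option.isSome_iff_exists.mp
  unfold lastTerm pend
  rw [hcl]
  rw [PySem.List.pyGet?_neg_one, hcl]
  simp [ht]

def finishB (p : List (List Char) × List Char) : Int :=
  cntYZ (if p.2 ≠ [] then p.1 ++ [p.2] else p.1)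

lemma foldB_inv (t : List Char) : ∀ (words : List (List Char)) (cur : List Char),
    finishB (t.foldl stepB (words, cur)) = cntYZ words + pend cur t + specCount t := by
  induction t with
  | nil =>
    intro words cur
    cases hcur : cur with
    | nil => simp [finishB, pend, specCount]
    | cons a as =>
      simp only [List.foldl_nil, finishB, specCount]
      rw [if_pos (by simp)]
      rw [cntYZ_append_singleton]
      rw [lastTerm_eq_pend (a :: as) (by simp) [] (by simp)]
      ring
  | cons d rs ih =>
    intro words cur
    simp only [List.foldl_cons]
    by_cases hd : PySem.Chars.isalpha d = true
    · have hstep : stepB (words, cur) d = (words, cur ++ [d]) := by simp [stepB, hd]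
      rw [hstep, ih]
      have hpendcur : pend cur (d :: rs) = 0 := by
        unfold pend
        cases cur.getLast? with
        | none => rfl
        | some c => simp [hd]
      have hpend' : pend (cur ++ [d]) rs =
          (if (d = 'y' ∨ d = 'z') ∧ rs.head?.all (fun e => !PySem.Chars.isalpha e) = true then 1 else 0) := by
        unfold pend
        rw [List.getLast?_append_of_ne_nil (l₁ := cur) (by simp)]
        simp [and_comm]
      rw [hpend', hpendcur, specCount_cons]
      ring
    · have hd' : PySem.Chars.isalpha d = false := by simpa using hd
      have hdyz : ¬ (d = 'y' ∨ d = 'z') := by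
        rintro (rfl | rfl) <;> simp_all <;> revert hd' <;> decide
      have hspec : specCount (d :: rs) = specCount rs := by
        rw [specCount_cons, if_neg (by tauto)]; ring
      cases hcur : cur with
      | nil =>
        have hstep : stepB (words, ([] : List Char)) d = (words, []) := by simp [stepB, hd]
        rw [hstep, ih]
        simp [pend, hspec]
      | cons a as =>
        have hstep : stepB (words, a :: as) d = (words ++ [a :: as], []) := by
          simp [stepB, hd]
        rw [hstep, ih, cntYZ_append_singleton]
        have : lastTerm (a :: as) = pend (a :: as) (d :: rs) := by
          apply lastTerm_eq_pend _ (by simp)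
          simp [hd']
        rw [this, hspec]
        simp [pend]
  
lemma countYZ_alt_eq_spec (text : String) :
    countYZ_alt text = specCount (PySem.Chars.lower text.toList) := by
  have hB : countYZ_alt text
      = finishB ((PySem.Chars.lower text.toList).foldl stepB ([], [])) := rfl
  rw [hB, foldB_inv]
  norm_num [cntYZ, pend]

-- ===== VERDICT (by name: the statement is the Claim_ definition above) =====
theorem countYZ_spec : Claim_equal_countYZ := by
  intro text _
  unfold Spec_countYZ
  rw [countYZ_alt_eq_spec]
  have hA : countYZ text
      = (PySem.List.pyRange 0 (((PySem.Chars.lower text.toList).length : Int)) 1).foldl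
          (stepA (PySem.Chars.lower text.toList)) 0 := rfl
  rw [hA, foldA_eq]
  ring
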